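-- pv_equiv track=rewrite | github.com/zukhai3604/test123 | test/app.py | tinh_quai_menh
-- ===== SOURCE A (Python) =====
-- def tinh_quai_menh(nam_am, gioi_tinh):
--     tong = sum(int(ch) for ch in str(nam_am))
--     so_du = tong % 9
--     if so_du == 0:
--         so_du = 9
--
--     bang_nam = {
--         1: "KHẢM", 2: "LY", 3: "CẤN", 4: "ĐOÀI", 5: "CÀN",
--         6: "KHÔN", 7: "TỐN", 8: "CHẤN", 9: "KHÔN", 0: "KHÔN"
--     }
--
--     bang_nu = {
--         1: "CẤN", 2: "CÀN", 3: "ĐOÀI", 4: "CẤN", 5: "LY",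
--         6: "KHẢM", 7: "KHÔN", 8: "CHẤN", 9: "TỐN", 0: "TỐN"
--     }
--
--     if gioi_tinh.lower() == 'nam':
--         return bang_nam.get(so_du)
--     else:
--         return bang_nu.get(so_du)
-- ===== SOURCE B (Python) =====
-- def tinh_quai_menh(nam_am, gioi_tinh):
--     # digit sum mod 9 == nam_am mod 9, and table[0] == table[9] in both gender
--     # tables, so a single modulo indexes a 9-entry list directly.
--     bang_nam = ["KHÔN", "KHẢM", "LY", "CẤN", "ĐOÀI", "CÀN", "KHÔN", "TỐN", "CHẤN"]
--     bang_nu = ["TỐN", "CẤN", "CÀN", "ĐOÀI", "CẤN", "LY", "KHẢM", "KHÔN", "CHẤN"]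
--     bang = bang_nam if gioi_tinh.lower() == 'nam' else bang_nu
--     return bang[nam_am % 9]
-- ===== Notes on version B (the rewrite author's own statement) =====
-- stated objective: simpler
-- what changed: B drops the string conversion, per-character digit summation, 0->9 fixup and the two 10-entry dicts entirely: since the digit sum of n is congruent to n mod 9 and both tables assign the same trigram to keys 0 and 9, B indexes a 9-entry per-gender list with nam_am % 9.
import Mathlib
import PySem

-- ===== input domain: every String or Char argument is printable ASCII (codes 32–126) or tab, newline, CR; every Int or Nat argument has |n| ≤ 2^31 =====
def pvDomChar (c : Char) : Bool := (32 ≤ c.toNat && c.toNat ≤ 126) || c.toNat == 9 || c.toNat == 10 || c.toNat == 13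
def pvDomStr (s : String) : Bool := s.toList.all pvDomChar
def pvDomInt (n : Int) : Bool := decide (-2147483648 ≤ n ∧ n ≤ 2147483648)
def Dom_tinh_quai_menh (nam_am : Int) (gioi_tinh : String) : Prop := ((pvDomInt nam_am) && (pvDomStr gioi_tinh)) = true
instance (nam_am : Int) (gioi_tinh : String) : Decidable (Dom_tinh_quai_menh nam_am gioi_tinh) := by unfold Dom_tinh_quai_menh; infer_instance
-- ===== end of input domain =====

-- B replaces the digit-sum + mod-9 + 0→9 fixup + 10-entry dicts by a single
-- `nam_am % 9` indexing a 9-entry list per gender (simpler; digit sum ≡ n mod 9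
-- and both tables map 0 and 9 to the same trigram).

-- ===== PORT A =====
def tinh_quai_menh (nam_am : Int) (gioi_tinh : String) : Option String :=
  -- tong = sum(int(ch) for ch in str(nam_am)); on a non-digit char ('-', i.e.
  -- negative nam_am) Python raises ValueError — excluded by Pre_; `.getD 0` there is unclaimed.
  let tong : Int := (PySem.Int.toStr nam_am).toList.foldl
      (fun acc ch => acc + (PySem.Int.ofChars? [ch]).getD 0) 0
  let so_du := PySem.Int.mod tong 9
  let so_du := if so_du == 0 then (9 : Int) else so_du
  let bang_nam : PySem.Dict Int String := PySem.Dict.ofList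
    [(1, "KHẢM"), (2, "LY"), (3, "CẤN"), (4, "ĐOÀI"), (5, "CÀN"),
     (6, "KHÔN"), (7, "TỐN"), (8, "CHẤN"), (9, "KHÔN"), (0, "KHÔN")]
  let bang_nu : PySem.Dict Int String := PySem.Dict.ofList
    [(1, "CẤN"), (2, "CÀN"), (3, "ĐOÀI"), (4, "CẤN"), (5, "LY"),
     (6, "KHẢM"), (7, "KHÔN"), (8, "CHẤN"), (9, "TỐN"), (0, "TỐN")]
  if PySem.Str.lower gioi_tinh == "nam" then bang_nam.get? so_du else bang_nu.get? so_du

-- ===== PORT B =====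
def tinh_quai_menh_alt (nam_am : Int) (gioi_tinh : String) : Option String :=
  let bang_nam : List String := ["KHÔN", "KHẢM", "LY", "CẤN", "ĐOÀI", "CÀN", "KHÔN", "TỐN", "CHẤN"]
  let bang_nu : List String := ["TỐN", "CẤN", "CÀN", "ĐOÀI", "CẤN", "LY", "KHẢM", "KHÔN", "CHẤN"]
  let bang := if PySem.Str.lower gioi_tinh == "nam" then bang_nam else bang_nu
  PySem.List.pyGet? bang (PySem.Int.mod nam_am 9)

-- ===== PRECONDITION & SPEC =====
-- Pre_ excludes negative nam_am, on which A raises ValueError (int('-')).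
def Pre_tinh_quai_menh (nam_am : Int) (gioi_tinh : String) : Prop := 0 ≤ nam_am
instance (nam_am : Int) (gioi_tinh : String) : Decidable (Pre_tinh_quai_menh nam_am gioi_tinh) := by unfold Pre_tinh_quai_menh; infer_instance
def pvWitness_tinh_quai_menh : Int × String := (1990, "nam")
def Spec_tinh_quai_menh (nam_am : Int) (gioi_tinh : String) (out : Option String) : Prop := out = tinh_quai_menh_alt nam_am gioi_tinh
instance (nam_am : Int) (gioi_tinh : String) (out : Option String) : Decidable (Spec_tinh_quai_menh nam_am gioi_tinh out) := by unfold Spec_tinh_quai_menh; infer_instance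

-- ===== CLAIM (what is proved, stated in full; the proofs are below) =====
def Claim_equal_tinh_quai_menh : Prop := ∀ (nam_am : Int) (gioi_tinh : String), Dom_tinh_quai_menh nam_am gioi_tinh → Pre_tinh_quai_menh nam_am gioi_tinh → Spec_tinh_quai_menh nam_am gioi_tinh (tinh_quai_menh nam_am gioi_tinh)

-- ===== LEMMAS AND PROOFS =====

-- Decimal representation of a Nat (most significant digit first), as Python's str builds it.
def pvRep (n : Nat) : List Char :=
  if h : n < 10 then [Nat.digitChar n]
  else pvRep (n / 10) ++ [Nat.digitChar (n % 10)]
  decreasing_by exact Nat.div_lt_self (by omega) (by omega)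

def pvCharVal (ch : Char) : Int := (PySem.Int.ofChars? [ch]).getD 0

theorem pvToDigitsCore_eq (f : Nat) : ∀ (n : Nat) (l : List Char),
    n < f → Nat.toDigitsCore 10 f n l = pvRep n ++ l := by
  induction f with
  | zero => intro n l h; omega
  | succ f ih =>
    intro n l h
    rw [Nat.toDigitsCore]
    by_cases h10 : n < 10
    · have : n / 10 = 0 := Nat.div_eq_of_lt h10
      simp [this, pvRep, h10, Nat.mod_eq_of_lt h10]
    · have hne : n / 10 ≠ 0 := by omega
      have hlt : n / 10 < f := by
        have := Nat.div_lt_self (n := n) (by omega) (show 1 < 10 by omega)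
        omega
      simp only [hne, if_false]
      rw [ih _ _ hlt]
      conv_rhs => rw [pvRep]
      simp [h10]

theorem pvCharVal_digitChar (d : Nat) (h : d < 10) :
    pvCharVal (Nat.digitChar d) = (d : Int) := by
  interval_cases d <;> decide

theorem pvSum_rep (n : Nat) :
    ((pvRep n).map pvCharVal).sum % 9 = (n : Int) % 9 := by
  induction n using Nat.strong_induction_on with
  | _ n ih =>
    by_cases h : n < 10
    · rw [pvRep]; simp [h, pvCharVal_digitChar n h]
    · rw [pvRep]
      simp only [h, dite_false, List.map_append, List.sum_append, List.map_cons,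
        List.map_nil, List.sum_cons, List.sum_nil]
      have hlt : n / 10 < n := Nat.div_lt_self (by omega) (by omega)
      have h1 := ih (n / 10) hlt
      rw [pvCharVal_digitChar (n % 10) (Nat.mod_lt _ (by omega))]
      omega

theorem pvTong_mod9 (n : Int) (h : 0 ≤ n) :
    ((PySem.Int.toStr n).toList.foldl
      (fun acc ch => acc + (PySem.Int.ofChars? [ch]).getD 0) 0) % 9 = n % 9 := by
  rw [PySem.Int.toList_toStr]
  have hch : PySem.Int.toChars n = pvRep n.toNat := by
    unfold PySem.Int.toChars
    rw [if_neg (by omega), Nat.toDigits, pvToDigitsCore_eq _ _ _ (Nat.lt_succ_self _),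
      List.append_nil]
  rw [hch, PySem.List.foldl_add]
  have := pvSum_rep n.toNat
  have hn : ((n.toNat : Nat) : Int) = n := Int.toNat_of_nonneg h
  rw [hn] at this
  show (0 + ((pvRep n.toNat).map pvCharVal).sum) % 9 = n % 9
  omega

-- ===== VERDICT (by name: the statement is the Claim_ definition above) =====
theorem tinh_quai_menh_spec : Claim_equal_tinh_quai_menh := by
  intro n g _ hpre
  unfold Spec_tinh_quai_menh tinh_quai_menh tinh_quai_menh_alt
  have hpre' : (0:Int) ≤ n := hpre
  simp only []
  rw [show PySem.Int.mod
      ((PySem.Int.toStr n).toList.foldl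
        (fun acc ch => acc + (PySem.Int.ofChars? [ch]).getD 0) 0) 9 =
      PySem.Int.mod n 9 by
    rw [PySem.Int.mod_eq_emod_of_pos (show (0:Int) < 9 by omega),
      PySem.Int.mod_eq_emod_of_pos (show (0:Int) < 9 by omega)]
    exact pvTong_mod9 n hpre']
  have h0 : 0 ≤ PySem.Int.mod n 9 := PySem.Int.mod_nonneg n (by omega)
  have h9 : PySem.Int.mod n 9 < 9 := PySem.Int.mod_lt n (by omega)
  generalize PySem.Int.mod n 9 = r at h0 h9 ⊢
  cases PySem.Str.lower g == "nam" <;>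
    (interval_cases r <;> decide)
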